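-- pv_equiv track=rewrite | github.com/MdAbedin/binarysearch | 0478 Palindrome Count.py | solve
-- ===== SOURCE A (Python) =====
-- def solve(s, k):
--     if not s: return 1 if k == 0 else 0
--
--     s = set(s)
--     dp = [len(s)] if k%2 == 1 else [1]
--
--     return (len(s) if k%2 == 1 else 1)**(k//2)
--     for i in range(k//2):
--         dp.append(dp[-1]*len(s))
--
--     return dp[-1]
-- ===== SOURCE B (Python) =====
-- def _binpow(b, e):
--     # recursive exponentiation by squaring
--     if e <= 0:
--         return 1
--     h = _binpow(b, e // 2)
--     return h * h * (b if e % 2 == 1 else 1)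
--
-- def solve(s, k):
--     # Even k contributes base 1, so the answer is 1 outright; odd k needs
--     # distinct-char count raised to k//2, computed by recursive squaring.
--     if not s:
--         return 1 if k == 0 else 0
--     if k % 2 == 0:
--         return 1
--     return _binpow(len(set(s)), k // 2)
-- ===== Notes on version B (the rewrite author's own statement) =====
-- stated objective: alternative
-- what changed: B short-circuits even k to 1 and, for odd k, computes the distinct-character count raised to k//2 by recursive exponentiation-by-squaring instead of A's built-in ** on a conditionally chosen base.
-- outside the precondition, e.g. on solve('ab', -3): A returns 0.25, B returns 1
import Mathlib
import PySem

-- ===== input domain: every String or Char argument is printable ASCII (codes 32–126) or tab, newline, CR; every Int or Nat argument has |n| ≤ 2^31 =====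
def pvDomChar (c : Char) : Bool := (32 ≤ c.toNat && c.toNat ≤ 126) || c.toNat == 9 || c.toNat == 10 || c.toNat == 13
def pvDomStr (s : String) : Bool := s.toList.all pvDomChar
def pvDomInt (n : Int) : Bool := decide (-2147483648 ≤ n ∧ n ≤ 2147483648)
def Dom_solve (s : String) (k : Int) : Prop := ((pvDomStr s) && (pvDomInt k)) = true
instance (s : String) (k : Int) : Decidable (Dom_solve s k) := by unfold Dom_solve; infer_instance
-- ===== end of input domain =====

-- B short-circuits even k to 1 and computes the odd-k power by recursive squaring; equal return values on Pre_.

-- ===== PORT A =====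
-- A: if not s: return 1 if k == 0 else 0; s = set(s); return (len(s) if k%2==1 else 1) ** (k//2)
-- (k//2).toNat is exact under Pre_solve (0 ≤ k); for k < 0 Python's ** yields a float, excluded by Pre_.
def solve (s : String) (k : Int) : Int :=
  if s = "" then (if k = 0 then 1 else 0)
  else
    let n : Int := ((PySem.Set.ofList s.toList : PySem.Set Char) : List Char).length
    (if PySem.Int.mod k 2 = 1 then n else 1) ^ (PySem.Int.floordiv k 2).toNat

-- ===== PORT B =====
-- B helper _binpow(b, e): recursive exponentiation by squaring; exact for e ≥ 0
-- (Python's 'e <= 0' guard is the Nat 'e = 0' base case; Pre_ gives 0 ≤ k//2).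
def binpow (b : Int) (e : Nat) : Int :=
  if e = 0 then 1
  else
    let h := binpow b (e / 2)
    h * h * (if e % 2 = 1 then b else 1)
decreasing_by exact Nat.div_lt_self (Nat.pos_of_ne_zero (by assumption)) one_lt_two

-- B: empty guard; even k → 1; odd k → _binpow(len(set(s)), k//2)
def solve_alt (s : String) (k : Int) : Int :=
  if s = "" then (if k = 0 then 1 else 0)
  else if PySem.Int.mod k 2 = 0 then 1
  else binpow (((PySem.Set.ofList s.toList : PySem.Set Char) : List Char).length)
              (PySem.Int.floordiv k 2).toNat

-- ===== PRECONDITION & SPEC =====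
-- Pre_ excludes nonempty s with k < 0: there A's '** (k//2)' has a negative exponent
-- and returns a Python float (e.g. 0.25), not an int.
def Pre_solve (s : String) (k : Int) : Prop := s = "" ∨ 0 ≤ k
instance (s : String) (k : Int) : Decidable (Pre_solve s k) := by unfold Pre_solve; infer_instance
def pvWitness_solve : String × Int := ("ab", 5)

def Spec_solve (s : String) (k : Int) (out : Int) : Prop := out = solve_alt s k
instance (s : String) (k : Int) (out : Int) : Decidable (Spec_solve s k out) := by unfold Spec_solve; infer_instance

-- ===== CLAIM (what is proved, stated in full; the proofs are below) =====
def Claim_equal_solve : Prop := ∀ (s : String) (k : Int), Dom_solve s k → Pre_solve s k → Spec_solve s k (solve s k)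

-- ===== LEMMAS AND PROOFS =====

-- exponentiation by squaring computes the power
theorem binpow_eq (b : Int) (e : Nat) : binpow b e = b ^ e := by
  induction e using Nat.strong_induction_on with
  | _ e ih =>
    unfold binpow
    split
    · simp [*]
    · rename_i h
      rw [ih (e / 2) (Nat.div_lt_self (Nat.pos_of_ne_zero h) one_lt_two)]
      have h2 : e = e / 2 + e / 2 + e % 2 := by omega
      conv_rhs => rw [h2]
      rw [pow_add, pow_add]
      by_cases hm : e % 2 = 1
      · rw [if_pos hm, hm, pow_one]
      · have hm0 : e % 2 = 0 := by omega
        rw [if_neg hm, hm0, pow_zero]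

-- Python k % 2 is 0 or 1
theorem mod_two_cases (k : Int) : PySem.Int.mod k 2 = 0 ∨ PySem.Int.mod k 2 = 1 := by
  have h1 := PySem.Int.mod_nonneg k (b := 2) (by omega)
  have h2 := PySem.Int.mod_lt k (b := 2) (by omega)
  omega

-- ===== VERDICT (by name: the statement is the Claim_ definition above) =====
theorem solve_spec : Claim_equal_solve := by
  intro s k _ hpre
  unfold Spec_solve solve solve_alt
  by_cases hs : s = ""
  · simp [hs]
  · simp only [if_neg hs]
    rcases mod_two_cases k with hm | hm
    · have h0 : k % 2 = 0 := by
        rw [← PySem.Int.mod_eq_emod_of_pos (by omega)]; exact hm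
      have h1 : PySem.Int.mod k 2 ≠ 1 := by omega
      simp only [if_neg h1, if_pos hm, one_pow]
    · have hne : PySem.Int.mod k 2 ≠ 0 := by omega
      simp only [if_pos hm, if_neg hne, binpow_eq]
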